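-- pv_equiv track=rewrite | github.com/gerlichlab/spoc | spoc/contacts.py | _generate_binary_label_mapping
-- ===== SOURCE A (Python) =====
-- from typing import Dict
-- from typing import List
-- from typing import Tuple
--
-- def _generate_binary_label_mapping(
--     label_values: List[str], number_fragments: int
-- ) -> Dict[Tuple[str, ...], Tuple[str, ...]]:
--     sorted_labels = sorted(label_values)
--     mapping = {}
--     for i in range(number_fragments + 1):
--         target = [sorted_labels[0]] * (number_fragments - i) + [
--             sorted_labels[-1]
--         ] * (i)
--         source = [sorted_labels[0]] * (i) + [sorted_labels[-1]] * (
--             number_fragments - i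
--         )
--         if i <= (number_fragments // 2):
--             mapping[tuple(source)] = tuple(target)
--         else:
--             mapping[tuple(source)] = ()
--     return mapping
-- ===== SOURCE B (Python) =====
-- def _generate_binary_label_mapping(label_values, number_fragments):
--     n = number_fragments
--     if n < 0:
--         return {}
--     lo, hi = min(label_values), max(label_values)
--     # build the key tuples incrementally: each next key is the previous one
--     # shifted right with a `lo` prepended ((lo,)+k[:-1]); no per-index rebuild
--     keys = [(hi,) * n]
--     for _ in range(n):
--         keys.append((lo,) + keys[-1][:-1])
--     # target(i) = key(n-i): the targets are the reversed key list, truncated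
--     # after the midpoint and padded with empty tuples
--     half = n // 2 + 1
--     targets = list(reversed(keys))[:half] + [()] * (n + 1 - half)
--     return dict(zip(keys, targets))
-- ===== Notes on version B (the rewrite author's own statement) =====
-- stated objective: alternative
-- what changed: B replaces the per-index tuple rebuilding with an incremental shift recurrence (next key = lo prepended to the previous key minus its last element), obtains all targets at once as the reversed key list truncated at the midpoint and padded with empty tuples, and builds the dict in one shot with dict(zip(keys, targets)) instead of per-iteration assignments; min/max replace the sort.
-- outside the precondition, e.g. on _generate_binary_label_mapping([], 2): A raises IndexError, B raises ValueError
import Mathlib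
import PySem

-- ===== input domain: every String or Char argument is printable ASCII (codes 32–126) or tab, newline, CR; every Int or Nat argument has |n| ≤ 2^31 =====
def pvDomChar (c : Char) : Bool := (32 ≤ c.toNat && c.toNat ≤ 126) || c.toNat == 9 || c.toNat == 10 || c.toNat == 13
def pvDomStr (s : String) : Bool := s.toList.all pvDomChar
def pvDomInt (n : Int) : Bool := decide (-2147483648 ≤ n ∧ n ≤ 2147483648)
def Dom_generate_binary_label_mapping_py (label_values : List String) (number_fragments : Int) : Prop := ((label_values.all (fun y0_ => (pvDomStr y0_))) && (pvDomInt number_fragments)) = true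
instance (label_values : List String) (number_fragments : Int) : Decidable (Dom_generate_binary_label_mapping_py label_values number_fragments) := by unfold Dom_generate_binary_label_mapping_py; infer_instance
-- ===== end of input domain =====

-- B builds each key tuple once by a shift recurrence (next key = low prepended to the
-- previous key without its last element), reads all targets off the reversed key list
-- truncated at the midpoint, and builds the dict in one shot with dict(zip(keys, targets)).

-- ===== PORT A =====
-- literal transliteration of _generate_binary_label_mapping; sorted_labels[0]/[-1] are
-- ported with pyGetD (the "" defaults are unreachable under Pre_, which excludes exactly
-- the IndexError inputs)
def generate_binary_label_mapping_py (label_values : List String) (number_fragments : Int) : List (List String × List String) :=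
  let sorted_labels := PySem.List.sorted label_values (fun x => x) false
  let mapping : PySem.Dict (List String) (List String) :=
    (PySem.List.pyRange 0 (number_fragments + 1)).foldl (fun mapping i =>
      let target := PySem.List.pyRepeat [PySem.List.pyGetD sorted_labels 0 ""] (number_fragments - i)
                    ++ PySem.List.pyRepeat [PySem.List.pyGetD sorted_labels (-1) ""] i
      let source := PySem.List.pyRepeat [PySem.List.pyGetD sorted_labels 0 ""] i
                    ++ PySem.List.pyRepeat [PySem.List.pyGetD sorted_labels (-1) ""] (number_fragments - i)
      if i ≤ PySem.Int.floordiv number_fragments 2 then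
        mapping.insert source target
      else
        mapping.insert source []) PySem.Dict.empty
  mapping.items

-- ===== PORT B =====
-- literal transliteration of Source B (min(…)/max(…) raise ValueError on an empty list —
-- the "" defaults of .getD are unreachable under Pre_)
def generate_binary_label_mapping_py_alt (label_values : List String) (number_fragments : Int) : List (List String × List String) :=
  let n := number_fragments
  if n < 0 then []
  else
    let lo := (PySem.List.min? label_values (fun x => x)).getD ""
    let hi := (PySem.List.max? label_values (fun x => x)).getD ""
    let keys := (PySem.List.pyRange 0 n).foldl
      (fun ks _ => ks ++ [[lo] ++ PySem.List.slice (PySem.List.pyGetD ks (-1) []) none (some (-1))])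
      [PySem.List.pyRepeat [hi] n]
    let half := PySem.Int.floordiv n 2 + 1
    let targets := PySem.List.slice keys.reverse none (some half)
                   ++ PySem.List.pyRepeat [([] : List String)] (n + 1 - half)
    (PySem.Dict.ofList (keys.zip targets)).items

-- ===== PRECONDITION & SPEC =====
-- Pre_ excludes exactly the inputs where A raises (IndexError on an empty label list with a
-- non-negative fragment count; B raises ValueError there too).
def Pre_generate_binary_label_mapping_py (label_values : List String) (number_fragments : Int) : Prop :=
  label_values ≠ [] ∨ number_fragments < 0
instance (label_values : List String) (number_fragments : Int) : Decidable (Pre_generate_binary_label_mapping_py label_values number_fragments) := by unfold Pre_generate_binary_label_mapping_py; infer_instance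

def pvWitness_generate_binary_label_mapping_py : List String × Int := (["b", "a"], 3)

def Spec_generate_binary_label_mapping_py (label_values : List String) (number_fragments : Int) (out : List (List String × List String)) : Prop := out = generate_binary_label_mapping_py_alt label_values number_fragments
instance (label_values : List String) (number_fragments : Int) (out : List (List String × List String)) : Decidable (Spec_generate_binary_label_mapping_py label_values number_fragments out) := by unfold Spec_generate_binary_label_mapping_py; infer_instance

-- ===== CLAIM (what is proved, stated in full; the proofs are below) =====
def Claim_equal_generate_binary_label_mapping_py : Prop := ∀ (label_values : List String) (number_fragments : Int), Dom_generate_binary_label_mapping_py label_values number_fragments → Pre_generate_binary_label_mapping_py label_values number_fragments → Spec_generate_binary_label_mapping_py label_values number_fragments (generate_binary_label_mapping_py label_values number_fragments)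

-- ===== LEMMAS AND PROOFS =====

-- the i-th key/source tuple: lo^i ++ hi^(m-i)
def pvSrc (lo hi : String) (m i : Nat) : List String :=
  List.replicate i lo ++ List.replicate (m - i) hi

-- head of sorted(lv) equals min(lv) as a value
lemma sorted_head_eq_min (lv : List String) (h : lv ≠ []) :
    PySem.List.pyGetD (PySem.List.sorted lv (fun x => x) false) 0 ""
      = (PySem.List.min? lv (fun x => x)).getD "" := by
  obtain ⟨mn, hmn⟩ : ∃ mn, PySem.List.min? lv (fun x => x) = some mn := by
    cases hm : PySem.List.min? lv (fun x => x) with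
    | none => exact absurd ((PySem.List.min?_eq_none_iff lv _).mp hm) h
    | some m => exact ⟨m, rfl⟩
  cases hs : PySem.List.sorted lv (fun x => x) false with
  | nil => exact absurd ((PySem.List.sorted_eq_nil_iff lv _ false).mp hs) h
  | cons m t =>
    have hmem : m ∈ lv := (PySem.List.mem_sorted lv _ false m).mp (hs ▸ List.mem_cons_self)
    have h1 := PySem.List.key_head_sorted_le lv (fun x => x) hs mn (PySem.List.min?_mem hmn)
    have h2 := PySem.List.min?_isMin hmn m hmem
    simp [PySem.List.pyGetD, PySem.List.pyGet?, PySem.List.pyIdx?, hmn, le_antisymm h1 h2]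

-- last element of sorted(lv) equals max(lv) as a value
lemma sorted_last_eq_max (lv : List String) (h : lv ≠ []) :
    PySem.List.pyGetD (PySem.List.sorted lv (fun x => x) false) (-1) ""
      = (PySem.List.max? lv (fun x => x)).getD "" := by
  obtain ⟨mx, hmx⟩ : ∃ mx, PySem.List.max? lv (fun x => x) = some mx := by
    cases hm : PySem.List.max? lv (fun x => x) with
    | none => exact absurd ((PySem.List.max?_eq_none_iff lv _).mp hm) h
    | some m => exact ⟨m, rfl⟩
  set L := PySem.List.sorted lv (fun x => x) false with hL
  have hlen : L.length = lv.length := PySem.List.length_sorted lv _ false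
  have hpos : 0 < L.length := by
    rw [hlen]; exact List.length_pos_iff.mpr h
  have hget : PySem.List.pyGetD L (-1) "" = L[L.length - 1]'(by omega) := by
    simp only [PySem.List.pyGetD, PySem.List.pyGet?, PySem.List.pyIdx?]
    have h1 : ¬ ((0:Int) ≤ -1) := by decide
    rw [if_neg h1, if_pos (by omega)]
    simp [List.getElem?_eq_getElem (by omega : L.length - 1 < L.length)]
  rw [hget, hmx]
  have hmemL : L[L.length - 1]'(by omega) ∈ lv :=
    (PySem.List.mem_sorted lv _ false _).mp (List.getElem_mem _)
  obtain ⟨p, hp, hpe⟩ := List.getElem_of_mem ((PySem.List.mem_sorted lv (fun x => x) false mx).mpr (PySem.List.max?_mem hmx))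
  have h1 : mx ≤ L[L.length - 1]'(by omega) := by
    have := PySem.List.key_sorted_getElem_mono lv (fun x => x) (p := p) (q := L.length - 1) (by rw [← hL] at hp; omega) (by show L.length - 1 < L.length; omega)
    simpa [hpe] using this
  have h2 := PySem.List.max?_isMax hmx _ hmemL
  simp [le_antisymm h1 h2]

-- B's shift-recurrence fold produces exactly the list of key tuples pvSrc 0 .. pvSrc k
lemma keys_fold_eq (lo hi : String) (m : Nat) (k : Nat) (hk : k ≤ m) :
    (List.range k).foldl
      (fun ks _ => ks ++ [[lo] ++ (PySem.List.pyGetD ks (-1) ([] : List String)).dropLast])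
      [List.replicate m hi]
    = (List.range (k + 1)).map (pvSrc lo hi m) := by
  induction k with
  | zero => simp [pvSrc]
  | succ k ih =>
    rw [List.range_succ, List.foldl_append, ih (by omega)]
    rw [List.range_succ (n := k + 1), List.map_append]
    simp only [List.foldl_cons, List.foldl_nil, List.map_cons, List.map_nil]
    congr 2
    rw [List.range_succ, List.map_append, List.map_cons, List.map_nil,
        PySem.List.pyGetD_neg_one_append_singleton]
    have hmk : m - k = (m - k - 1) + 1 := by omega
    show [lo] ++ (pvSrc lo hi m k).dropLast = pvSrc lo hi m (k + 1)
    unfold pvSrc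
    rw [hmk, List.replicate_succ']
    rw [← List.append_assoc, List.dropLast_concat]
    rw [show m - (k + 1) = m - k - 1 from by omega]
    simp [List.replicate_succ]

-- the targets list equals the per-index formula (pvSrc (m-i) up to the midpoint, else [])
lemma targets_eq (lo hi : String) (m : Nat) :
    ((List.range (m + 1)).map (pvSrc lo hi m)).reverse.take (m / 2 + 1)
      ++ List.replicate (m - m / 2) ([] : List String)
    = (List.range (m + 1)).map (fun i => if i ≤ m / 2 then pvSrc lo hi m (m - i) else []) := by
  apply List.ext_getElem
  · simp; omega
  intro i h1 h2
  have him : i < m + 1 := by simpa using h2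
  by_cases hi : i ≤ m / 2
  · rw [List.getElem_append_left (by simp; omega)]
    rw [List.getElem_take, List.getElem_reverse]
    simp only [List.length_map, List.length_range, List.getElem_map, List.getElem_range]
    rw [show m + 1 - 1 - i = m - i from by omega]
    simp [hi]
  · rw [List.getElem_append_right (by simp; omega)]
    simp [hi]

-- ===== VERDICT (by name: the statement is the Claim_ definition above) =====
theorem generate_binary_label_mapping_py_spec : Claim_equal_generate_binary_label_mapping_py := by
  intro lv n _ hpre
  unfold Spec_generate_binary_label_mapping_py
  unfold generate_binary_label_mapping_py generate_binary_label_mapping_py_alt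
  by_cases hn : n < 0
  · simp only [if_pos hn]
    rw [PySem.List.pyRange_one_eq_nil (by omega)]
    rfl
  · have hlv : lv ≠ [] := by
      rcases hpre with h | h
      · exact h
      · omega
    simp only [if_neg hn]
    rw [sorted_head_eq_min lv hlv, sorted_last_eq_max lv hlv]
    set lo := (PySem.List.min? lv (fun x => x)).getD "" with hlo
    set hi := (PySem.List.max? lv (fun x => x)).getD "" with hhi
    obtain ⟨m, rfl⟩ : ∃ m : Nat, n = (m : Int) := ⟨n.toNat, by omega⟩
    -- B side: keys, targets, zip
    have hrep : PySem.List.pyRepeat [hi] (m : Int) = List.replicate m hi := by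
      rw [PySem.List.pyRepeat_singleton]; simp
    have hkeys : (PySem.List.pyRange 0 (m : Int)).foldl
        (fun ks _ => ks ++ [[lo] ++ PySem.List.slice (PySem.List.pyGetD ks (-1) []) none (some (-1))])
        [PySem.List.pyRepeat [hi] (m : Int)]
        = (List.range (m + 1)).map (pvSrc lo hi m) := by
      rw [hrep]
      have : (PySem.List.pyRange 0 (m : Int)).foldl
          (fun ks _ => ks ++ [[lo] ++ PySem.List.slice (PySem.List.pyGetD ks (-1) []) none (some (-1))])
          [List.replicate m hi]
          = (PySem.List.pyRange 0 (m : Int)).foldl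
          (fun ks _ => ks ++ [[lo] ++ (PySem.List.pyGetD ks (-1) ([] : List String)).dropLast])
          [List.replicate m hi] := by
        apply PySem.List.foldl_congr_mem
        intro acc x _
        rw [PySem.List.slice_to_neg_one]
      rw [this, PySem.List.pyRange_zero_nat, List.foldl_map]
      exact keys_fold_eq lo hi m m le_rfl
    rw [hkeys]
    have hfd : PySem.Int.floordiv (m : Int) 2 = ((m / 2 : Nat) : Int) := by
      exact_mod_cast PySem.Int.floordiv_natCast m 2
    have hhalf : PySem.Int.floordiv (m : Int) 2 + 1 = ((m / 2 + 1 : Nat) : Int) := by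
      rw [hfd]; push_cast; ring
    have htake : PySem.List.slice ((List.range (m + 1)).map (pvSrc lo hi m)).reverse
        none (some (PySem.Int.floordiv (m : Int) 2 + 1))
        = ((List.range (m + 1)).map (pvSrc lo hi m)).reverse.take (m / 2 + 1) := by
      rw [hhalf, PySem.List.slice_to_natCast]
    have hpad : PySem.List.pyRepeat [([] : List String)] ((m : Int) + 1 - (PySem.Int.floordiv (m : Int) 2 + 1))
        = List.replicate (m - m / 2) ([] : List String) := by
      rw [PySem.List.pyRepeat_singleton, hhalf]
      congr 1
      have h2 : m / 2 ≤ m := Nat.div_le_self m 2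
      omega
    rw [htake, hpad, targets_eq lo hi m, List.zip_map']
    -- both dicts are the fold of insert over the same pair list
    have hofList : ∀ (P : List (List String × List String)),
        PySem.Dict.ofList P = P.foldl (fun d p => d.insert p.1 p.2) PySem.Dict.empty :=
      fun P => rfl
    rw [hofList, List.foldl_map]
    -- A side: reduce the pyRange fold to the same Nat-range fold
    rw [show (m : Int) + 1 = ((m + 1 : Nat) : Int) from by push_cast; ring,
        PySem.List.pyRange_zero_nat, List.foldl_map]
    apply congrArg PySem.Dict.items
    apply PySem.List.foldl_congr_mem
    intro acc k hk
    have hkm : k ≤ m := by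
      have := List.mem_range.mp hk; omega
    have hrlo : PySem.List.pyRepeat [lo] ((k : Nat) : Int) = List.replicate k lo := by
      rw [PySem.List.pyRepeat_singleton]; simp
    have hrhi : PySem.List.pyRepeat [hi] ((m : Int) - (k : Nat)) = List.replicate (m - k) hi := by
      rw [PySem.List.pyRepeat_singleton]
      congr 1; omega
    have hrlo2 : PySem.List.pyRepeat [lo] ((m : Int) - (k : Nat)) = List.replicate (m - k) lo := by
      rw [PySem.List.pyRepeat_singleton]
      congr 1; omega
    have hrhi2 : PySem.List.pyRepeat [hi] ((k : Nat) : Int) = List.replicate k hi := by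
      rw [PySem.List.pyRepeat_singleton]; simp
    simp only [hrlo, hrhi, hrlo2, hrhi2]
    by_cases hc : k ≤ m / 2
    · rw [if_pos (by rw [hfd]; exact_mod_cast hc), if_pos hc]
      show acc.insert (pvSrc lo hi m k) (List.replicate (m - k) lo ++ List.replicate k hi)
        = acc.insert (pvSrc lo hi m k) (pvSrc lo hi m (m - k))
      congr 1
      unfold pvSrc
      rw [show m - (m - k) = k from by omega]
    · rw [if_neg (by rw [hfd]; exact_mod_cast hc), if_neg hc]
      rfl
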